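-- pv_equiv track=rewrite | github.com/0xeb/useful-scripts | upyscripts/upyscripts/mksctxt.py | parse_markdown_simple
-- ===== SOURCE A (Python) =====
-- from typing import Tuple, List
--
-- def parse_markdown_simple(text: str) -> List[dict]:
--     """
--     Simple markdown parser that returns a list of elements.
--     Each element is a dict with 'type' and 'content'.
--     """
--     elements = []
--     lines = text.split('\n')
--     i = 0
--
--     while i < len(lines):
--         line = lines[i]
--
--         # Code block
--         if line.startswith('```'):
--             lang = line[3:].strip()
--             code_lines = []
--             i += 1
--             while i < len(lines) and not lines[i].startswith('```'):
--                 code_lines.append(lines[i])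
--                 i += 1
--             elements.append({
--                 'type': 'code',
--                 'lang': lang or 'text',
--                 'content': '\n'.join(code_lines)
--             })
--             i += 1
--             continue
--
--         # Headers
--         if line.startswith('# '):
--             elements.append({'type': 'h1', 'content': line[2:]})
--         elif line.startswith('## '):
--             elements.append({'type': 'h2', 'content': line[3:]})
--         elif line.startswith('### '):
--             elements.append({'type': 'h3', 'content': line[4:]})
--
--         # Blockquote
--         elif line.startswith('> '):
--             elements.append({'type': 'blockquote', 'content': line[2:]})
--
--         # List item
--         elif line.startswith('- ') or line.startswith('* '):
--             elements.append({'type': 'list_item', 'content': line[2:]})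
--
--         # Empty line
--         elif line.strip() == '':
--             elements.append({'type': 'spacer', 'content': ''})
--
--         # Regular paragraph
--         else:
--             elements.append({'type': 'paragraph', 'content': line})
--
--         i += 1
--
--     return elements
-- ===== SOURCE B (Python) =====
-- from typing import List
--
--
-- def _classify(line: str) -> dict:
--     if line.startswith('# '):
--         return {'type': 'h1', 'content': line[2:]}
--     if line.startswith('## '):
--         return {'type': 'h2', 'content': line[3:]}
--     if line.startswith('### '):
--         return {'type': 'h3', 'content': line[4:]}
--     if line.startswith('> '):
--         return {'type': 'blockquote', 'content': line[2:]}
--     if line.startswith('- ') or line.startswith('* '):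
--         return {'type': 'list_item', 'content': line[2:]}
--     if line.strip() == '':
--         return {'type': 'spacer', 'content': ''}
--     return {'type': 'paragraph', 'content': line}
--
--
-- def parse_markdown_simple(text: str) -> List[dict]:
--     """Staged: first index all fence lines, pair them up, then classify by slicing."""
--     lines = text.split('\n')
--     fences = [(i, line) for i, line in enumerate(lines) if line.startswith('```')]
--     elements = []
--     pos = 0
--     for k in range(0, len(fences), 2):
--         open_i, open_line = fences[k]
--         close_i = fences[k + 1][0] if k + 1 < len(fences) else len(lines)
--         elements.extend(_classify(line) for line in lines[pos:open_i])
--         elements.append({'type': 'code',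
--                          'lang': open_line[3:].strip() or 'text',
--                          'content': '\n'.join(lines[open_i + 1:close_i])})
--         pos = close_i + 1
--     elements.extend(_classify(line) for line in lines[pos:])
--     return elements
-- ===== Notes on version B (the rewrite author's own statement) =====
-- stated objective: alternative
-- what changed: Replaced A's stateful line-by-line scan (outer while with a nested fence-consuming inner loop) by a staged algorithm: one pass indexes all fence lines, consecutive fences are paired (with a sentinel end for an unclosed block), and the output is assembled by slicing the line list between paired fences and mapping a pure classifier over the non-code slices.
import Mathlib
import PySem

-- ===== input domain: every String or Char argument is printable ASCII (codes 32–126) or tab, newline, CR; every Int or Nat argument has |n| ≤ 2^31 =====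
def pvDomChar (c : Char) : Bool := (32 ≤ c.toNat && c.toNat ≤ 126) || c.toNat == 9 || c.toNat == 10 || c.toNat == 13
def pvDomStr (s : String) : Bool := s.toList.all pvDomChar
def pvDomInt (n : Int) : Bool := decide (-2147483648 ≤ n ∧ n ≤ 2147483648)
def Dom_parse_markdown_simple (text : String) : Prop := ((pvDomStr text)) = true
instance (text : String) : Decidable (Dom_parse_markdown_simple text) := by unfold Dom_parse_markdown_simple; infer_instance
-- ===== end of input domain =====

-- B replaces A's stateful line scan (while-loop with a nested fence-consuming inner loop)
-- by a staged algorithm: index all fence lines once, pair consecutive fences, then build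
-- the output by slicing the line list (objective: alternative decomposition; same cost).

-- ===== PORT A =====
-- inner 'while i < len(lines) and not lines[i].startswith("```")' of A: collects the
-- code lines and returns the remaining lines AFTER the closing fence (fence swallowed)
def pvScanCodeA : List String → List String × List String
  | [] => ([], [])
  | line :: rest =>
    if PySem.Str.startswith line "```" then ([], rest)
    else
      let p := pvScanCodeA rest
      (line :: p.1, p.2)

theorem pvScanCodeA_len_le : ∀ ls : List String, (pvScanCodeA ls).2.length ≤ ls.length := by
  intro ls
  induction ls with
  | nil => simp [pvScanCodeA]
  | cons line rest ih =>
      simp only [pvScanCodeA]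
      split
      · simp
      · simpa using Nat.le_succ_of_le ih

-- A's outer while-loop over the line index, as structural recursion on the line list
def pvGoA : List String → List (List (String × String))
  | [] => []
  | line :: rest =>
    if PySem.Str.startswith line "```" then
      let lang := PySem.Str.strip (PySem.Str.slice line (some 3) none)
      [("type", "code"),
       ("lang", if lang == "" then "text" else lang),
       ("content", PySem.Str.join "\n" (pvScanCodeA rest).1)] :: pvGoA (pvScanCodeA rest).2
    else if PySem.Str.startswith line "# " then
      [("type", "h1"), ("content", PySem.Str.slice line (some 2) none)] :: pvGoA rest
    else if PySem.Str.startswith line "## " then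
      [("type", "h2"), ("content", PySem.Str.slice line (some 3) none)] :: pvGoA rest
    else if PySem.Str.startswith line "### " then
      [("type", "h3"), ("content", PySem.Str.slice line (some 4) none)] :: pvGoA rest
    else if PySem.Str.startswith line "> " then
      [("type", "blockquote"), ("content", PySem.Str.slice line (some 2) none)] :: pvGoA rest
    else if PySem.Str.startswith line "- " || PySem.Str.startswith line "* " then
      [("type", "list_item"), ("content", PySem.Str.slice line (some 2) none)] :: pvGoA rest
    else if PySem.Str.strip line == "" then
      [("type", "spacer"), ("content", "")] :: pvGoA rest
    else
      [("type", "paragraph"), ("content", line)] :: pvGoA rest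
termination_by ls => ls.length
decreasing_by
  · exact Nat.lt_succ_of_le (pvScanCodeA_len_le rest)
  all_goals simp

def parse_markdown_simple (text : String) : List (List (String × String)) :=
  pvGoA ((PySem.Str.split? text "\n").getD [])

-- ===== PORT B =====
-- Source B's _classify
def pvClassifyB (line : String) : List (String × String) :=
  if PySem.Str.startswith line "# " then
    [("type", "h1"), ("content", PySem.Str.slice line (some 2) none)]
  else if PySem.Str.startswith line "## " then
    [("type", "h2"), ("content", PySem.Str.slice line (some 3) none)]
  else if PySem.Str.startswith line "### " then
    [("type", "h3"), ("content", PySem.Str.slice line (some 4) none)]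
  else if PySem.Str.startswith line "> " then
    [("type", "blockquote"), ("content", PySem.Str.slice line (some 2) none)]
  else if PySem.Str.startswith line "- " || PySem.Str.startswith line "* " then
    [("type", "list_item"), ("content", PySem.Str.slice line (some 2) none)]
  else if PySem.Str.strip line == "" then
    [("type", "spacer"), ("content", "")]
  else
    [("type", "paragraph"), ("content", line)]

-- Source B's 'for k in range(0, len(fences), 2)' loop: recursion over the fence-pair list,
-- carrying pos; close defaults to len(lines) for an unclosed final block
def pvGoB (lines : List String) : Int → List (Int × String) → List (List (String × String))
  | pos, [] => (PySem.List.slice lines (some pos) none).map pvClassifyB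
  | pos, (o, ol) :: rest =>
      let close : Int := match rest with | (c, _) :: _ => c | [] => (lines.length : Int)
      let lang := PySem.Str.strip (PySem.Str.slice ol (some 3) none)
      (PySem.List.slice lines (some pos) (some o)).map pvClassifyB ++
      ([("type", "code"),
        ("lang", if lang == "" then "text" else lang),
        ("content", PySem.Str.join "\n" (PySem.List.slice lines (some (o + 1)) (some close)))] ::
       pvGoB lines (close + 1) rest.tail)
termination_by _ F => F.length
decreasing_by simp [List.length_tail]

def parse_markdown_simple_alt (text : String) : List (List (String × String)) :=
  pvGoB ((PySem.Str.split? text "\n").getD []) 0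
    ((PySem.List.enumerate ((PySem.Str.split? text "\n").getD [])).filter
      (fun p => PySem.Str.startswith p.2 "```"))

-- ===== PRECONDITION & SPEC =====
def Spec_parse_markdown_simple (text : String) (out : List (List (String × String))) : Prop := out = parse_markdown_simple_alt text
instance (text : String) (out : List (List (String × String))) : Decidable (Spec_parse_markdown_simple text out) := by unfold Spec_parse_markdown_simple; infer_instance

-- ===== CLAIM (what is proved, stated in full; the proofs are below) =====
def Claim_equal_parse_markdown_simple : Prop := ∀ (text : String), Dom_parse_markdown_simple text → Spec_parse_markdown_simple text (parse_markdown_simple text)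

-- ===== LEMMAS AND PROOFS =====

def pvFence (l : String) : Bool := PySem.Str.startswith l "```"

theorem pvFence_pos {l : String} (h : pvFence l = true) : PySem.Str.startswith l "```" = true := h

theorem pvFence_neg {l : String} (h : pvFence l = false) : ¬ PySem.Str.startswith l "```" = true := by
  exact fun hc => Bool.false_ne_true (h ▸ hc)

-- spec-side view of Source B's enumerate+filter comprehension
def pvFencesFrom (k : Int) : List String → List (Int × String)
  | [] => []
  | l :: r => if pvFence l then (k, l) :: pvFencesFrom (k + 1) r else pvFencesFrom (k + 1) r

theorem pvEnumFilter_eq (ls : List String) : ∀ k : Int,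
    (PySem.List.enumerate ls k).filter (fun p => PySem.Str.startswith p.2 "```") = pvFencesFrom k ls := by
  induction ls with
  | nil => intro k; rw [PySem.List.enumerate_nil, pvFencesFrom]; rfl
  | cons l r ih =>
      intro k
      rw [PySem.List.enumerate_cons, List.filter_cons, pvFencesFrom, ih (k + 1)]
      rfl

theorem pvFencesFrom_nil_free {d : List String} : ∀ k : Int,
    pvFencesFrom k d = [] → ∀ l ∈ d, pvFence l = false := by
  induction d with
  | nil => simp
  | cons x r ih =>
      intro k h
      rw [pvFencesFrom] at h
      by_cases hx : pvFence x = true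
      · simp [hx] at h
      · rw [if_neg hx] at h
        intro l hl
        rcases List.mem_cons.mp hl with rfl | hl
        · exact Bool.eq_false_iff.mpr hx
        · exact ih (k + 1) h l hl

theorem pvFencesFrom_cons {d : List String} {o : Int} {ol : String} {rest : List (Int × String)} :
    ∀ k : Int, pvFencesFrom k d = (o, ol) :: rest →
    ∃ t r, d = t ++ ol :: r ∧ (∀ l ∈ t, pvFence l = false) ∧ o = k + t.length ∧
      pvFence ol = true ∧ rest = pvFencesFrom (o + 1) r := by
  induction d with
  | nil => intro k h; rw [pvFencesFrom] at h; exact absurd h (by simp)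
  | cons x r ih =>
      intro k h
      rw [pvFencesFrom] at h
      by_cases hx : pvFence x = true
      · rw [if_pos hx] at h
        injection h with h1 h2
        injection h1 with hk hl
        exact ⟨[], r, by simp [hl], by simp, by simp [hk], hl ▸ hx, by rw [← h2, hk]⟩
      · rw [if_neg hx] at h
        obtain ⟨t, r', hd, hfree, ho, hol, hrest⟩ := ih (k + 1) h
        refine ⟨x :: t, r', by simp [hd], ?_, by simp [ho]; ring, hol, hrest⟩
        intro l hl
        rcases List.mem_cons.mp hl with rfl | hl
        · exact Bool.eq_false_iff.mpr hx
        · exact hfree l hl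

theorem pvScan_free {v : List String} (h : ∀ l ∈ v, pvFence l = false) :
    pvScanCodeA v = (v, []) := by
  induction v with
  | nil => rfl
  | cons x r ih =>
      rw [pvScanCodeA, if_neg (pvFence_neg (h x (by simp)))]
      simp [ih fun l hl => h l (List.mem_cons_of_mem _ hl)]

theorem pvScan_split {u v : List String} {f : String}
    (hu : ∀ l ∈ u, pvFence l = false) (hf : pvFence f = true) :
    pvScanCodeA (u ++ f :: v) = (u, v) := by
  induction u with
  | nil => rw [List.nil_append, pvScanCodeA, if_pos (pvFence_pos hf)]
  | cons x r ih =>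
      rw [List.cons_append, pvScanCodeA, if_neg (pvFence_neg (hu x (by simp)))]
      simp [ih fun l hl => hu l (List.mem_cons_of_mem _ hl)]

theorem pvGoA_nil : pvGoA [] = [] := by rw [pvGoA]

theorem pvGoA_cons_free {line : String} (rest : List String) (h : pvFence line = false) :
    pvGoA (line :: rest) = pvClassifyB line :: pvGoA rest := by
  rw [pvGoA, if_neg (pvFence_neg h)]
  unfold pvClassifyB
  split_ifs <;> rfl

theorem pvGoA_free_prefix {t : List String} (d : List String) (h : ∀ l ∈ t, pvFence l = false) :
    pvGoA (t ++ d) = t.map pvClassifyB ++ pvGoA d := by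
  induction t with
  | nil => simp
  | cons x r ih =>
      rw [List.cons_append, pvGoA_cons_free _ (h x (by simp))]
      simp [ih fun l hl => h l (List.mem_cons_of_mem _ hl)]

theorem pvMain : ∀ (n : Nat) (F : List (Int × String)) (lines : List String) (p : Nat),
    F.length ≤ n → F = pvFencesFrom (p : Int) (lines.drop p) →
    pvGoB lines (p : Int) F = pvGoA (lines.drop p) := by
  intro n
  induction n with
  | zero =>
      intro F lines p hn hF
      match F, hn with
      | [], _ =>
          simp only [pvGoB, PySem.List.slice_from_natCast]
          have h0 := pvGoA_free_prefix (t := lines.drop p) [] (pvFencesFrom_nil_free _ hF.symm)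
          rw [List.append_nil] at h0
          rw [h0, pvGoA_nil, List.append_nil]
  | succ n ih =>
      intro F lines p hn hF
      match F with
      | [] =>
          simp only [pvGoB, PySem.List.slice_from_natCast]
          have h0 := pvGoA_free_prefix (t := lines.drop p) [] (pvFencesFrom_nil_free _ hF.symm)
          rw [List.append_nil] at h0
          rw [h0, pvGoA_nil, List.append_nil]
      | (o, ol) :: rest =>
          obtain ⟨t, r, hd, hfree, ho, hol, hrest⟩ := pvFencesFrom_cons _ hF.symm
          have ho' : o = ((p + t.length : Nat) : Int) := by push_cast; omega
          have hplen : p ≤ lines.length := by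
            by_contra hc
            rw [List.drop_eq_nil_of_le (by omega)] at hd
            exact absurd hd (by simp)
          have hdropA : lines.drop (p + t.length + 1) = r := by
            rw [show p + t.length + 1 = p + (t.length + 1) by ring, ← List.drop_drop, hd]
            simp
          have hslice_t : PySem.List.slice lines (some (p : Int)) (some o) = t := by
            rw [ho', PySem.List.slice_natCast, show p + t.length - p = t.length by omega, hd]
            simp
          have hlen_d : lines.length - p = t.length + 1 + r.length := by
            have := congrArg List.length hd
            simp [List.length_drop] at this
            omega
          match rest with
          | [] =>
              -- unclosed final code block: close_i = len(lines)
              have hrfree : ∀ l ∈ r, pvFence l = false := pvFencesFrom_nil_free _ hrest.symm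
              simp only [pvGoB, List.tail_nil]
              rw [hd, pvGoA_free_prefix _ hfree, pvGoA, if_pos (pvFence_pos hol),
                  pvScan_free hrfree]
              have hcontent : PySem.List.slice lines (some (o + 1)) (some (lines.length : Int)) = r := by
                rw [ho', show ((p + t.length : Nat) : Int) + 1 = ((p + t.length + 1 : Nat) : Int) by push_cast; ring,
                    PySem.List.slice_natCast, hdropA]
                exact List.take_of_length_le (by omega)
              rw [hcontent, hslice_t,
                  show (lines.length : Int) + 1 = ((lines.length + 1 : Nat) : Int) by push_cast; ring,
                  PySem.List.slice_from_natCast, List.drop_eq_nil_of_le (by omega)]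
              simp [pvGoA_nil]
          | (c, cl) :: rest' =>
              obtain ⟨u, r', hr, hufree, hc, hcl, hrest'⟩ := pvFencesFrom_cons _ hrest.symm
              have hc' : c = ((p + t.length + 1 + u.length : Nat) : Int) := by
                rw [hc, ho']; push_cast; ring
              have hdropC : lines.drop (p + t.length + 1 + u.length + 1) = r' := by
                rw [show p + t.length + 1 + u.length + 1 = (p + t.length + 1) + (u.length + 1) by ring,
                    ← List.drop_drop, hdropA, hr]
                simp
              simp only [pvGoB, List.tail_cons]
              rw [hd, pvGoA_free_prefix _ hfree, pvGoA, if_pos (pvFence_pos hol), hr,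
                  pvScan_split hufree hcl]
              have hcontent : PySem.List.slice lines (some (o + 1)) (some c) = u := by
                rw [hc', ho', show ((p + t.length : Nat) : Int) + 1 = ((p + t.length + 1 : Nat) : Int) by push_cast; ring,
                    PySem.List.slice_natCast, hdropA,
                    show p + t.length + 1 + u.length - (p + t.length + 1) = u.length by omega, hr]
                simp
              have hrec := ih rest' lines (p + t.length + 1 + u.length + 1)
                (by simp at hn ⊢; omega)
                (by rw [hdropC, hrest']; congr 1; rw [hc']; push_cast; ring)
              rw [hcontent, hslice_t,
                  show c + 1 = ((p + t.length + 1 + u.length + 1 : Nat) : Int) by rw [hc']; push_cast; ring,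
                  hrec, hdropC]

-- ===== VERDICT (by name: the statement is the Claim_ definition above) =====
theorem parse_markdown_simple_spec : Claim_equal_parse_markdown_simple := by
  intro text _
  unfold Spec_parse_markdown_simple parse_markdown_simple parse_markdown_simple_alt
  rw [pvEnumFilter_eq ((PySem.Str.split? text "\n").getD []) 0]
  exact (pvMain ((pvFencesFrom 0 ((PySem.Str.split? text "\n").getD [])).length) _ _ 0 le_rfl (by simp only [Nat.cast_zero, List.drop_zero]; rfl)).symm
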